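-- pv_equiv track=rewrite | github.com/kanatakayasu/apriori-window | paper/F-mdl-summary/implementation/python/mdl_summary.py | build_standard_code_table
-- ===== SOURCE A (Python) =====
-- from collections import Counter, defaultdict
-- from typing import Any, Dict, FrozenSet, List, Optional, Sequence, Tuple
--
-- def build_standard_code_table(
--     transactions: List[List[List[int]]],
-- ) -> Dict[int, int]:
--     """全トランザクションでの各アイテムの出現回数を返す（SCT 用）。"""
--     counts: Dict[int, int] = Counter()
--     for baskets in transactions:
--         seen = set()
--         for basket in baskets:
--             for item in basket:
--                 if item not in seen:
--                     seen.add(item)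
--                     counts[item] += 1
--     return dict(counts)
-- ===== SOURCE B (Python) =====
-- def build_standard_code_table(transactions):
--     # item order = first occurrence in the flattened traversal of all transactions
--     order = dict.fromkeys(item for baskets in transactions for basket in baskets for item in basket)
--     # one membership index per transaction
--     tx_items = [{item for basket in baskets for item in basket} for baskets in transactions]
--     # inverted loops: for each item, count the transactions whose index contains it
--     return {item: sum(item in s for s in tx_items) for item in order}
-- ===== Notes on version B (the rewrite author's own statement) =====
-- stated objective: alternative
-- what changed: B inverts the loop nesting: instead of A's single pass maintaining a per-transaction seen-set and a running Counter, B builds the global first-occurrence item order and one membership index (item set) per transaction, then computes each item's count independently as the number of transaction indexes containing it; no counter or seen-guard branch exists.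
import Mathlib
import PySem

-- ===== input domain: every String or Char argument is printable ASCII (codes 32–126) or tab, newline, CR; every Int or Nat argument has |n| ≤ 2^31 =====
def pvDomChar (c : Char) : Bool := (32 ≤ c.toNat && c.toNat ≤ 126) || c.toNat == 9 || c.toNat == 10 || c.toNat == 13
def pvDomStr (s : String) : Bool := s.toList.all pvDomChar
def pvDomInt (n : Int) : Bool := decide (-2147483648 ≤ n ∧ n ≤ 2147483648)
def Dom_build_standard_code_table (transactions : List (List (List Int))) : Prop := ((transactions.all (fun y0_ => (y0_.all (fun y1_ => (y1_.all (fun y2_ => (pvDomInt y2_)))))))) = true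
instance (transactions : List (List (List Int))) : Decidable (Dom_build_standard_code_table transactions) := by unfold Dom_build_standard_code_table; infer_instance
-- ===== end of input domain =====

-- B inverts the loop nesting: it builds the global first-occurrence item order once, then counts,
-- for each item independently, the transactions containing it by membership queries; objective: alternative.

-- ===== PORT A =====
-- the body of A's innermost loop: 'if item not in seen: seen.add(item); counts[item] += 1'
def pvStepA (st : PySem.Set Int × PySem.Dict Int Int) (item : Int) :
    PySem.Set Int × PySem.Dict Int Int :=
  if ¬ st.1.contains item then (st.1.add item, st.2.modify item 0 (· + 1)) else st

def build_standard_code_table (transactions : List (List (List Int))) : List (Int × Int) :=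
  (transactions.foldl
    (fun counts baskets =>
      (baskets.foldl (fun st basket => basket.foldl pvStepA st) (PySem.Set.empty, counts)).2)
    PySem.Dict.empty).items

-- ===== PORT B =====
def build_standard_code_table_alt (transactions : List (List (List Int))) : List (Int × Int) :=
  -- order = dict.fromkeys(item for baskets in transactions for basket in baskets for item in basket)
  let order := PySem.List.dedup (transactions.flatMap (fun baskets => baskets.flatten))
  -- tx_items = [{item for basket in baskets for item in basket} for baskets in transactions]
  let txItems := transactions.map (fun baskets => PySem.Set.ofList baskets.flatten)
  -- {item: sum(item in s for s in tx_items) for item in order}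
  order.map (fun item => (item, (txItems.countP (fun s => s.contains item) : Int)))

-- ===== PRECONDITION & SPEC =====
def Spec_build_standard_code_table (transactions : List (List (List Int))) (out : List (Int × Int)) : Prop := out = build_standard_code_table_alt transactions
instance (transactions : List (List (List Int))) (out : List (Int × Int)) : Decidable (Spec_build_standard_code_table transactions out) := by unfold Spec_build_standard_code_table; infer_instance

-- ===== CLAIM (what is proved, stated in full; the proofs are below) =====
def Claim_equal_build_standard_code_table : Prop := ∀ (transactions : List (List (List Int))), Dom_build_standard_code_table transactions → Spec_build_standard_code_table transactions (build_standard_code_table transactions)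

-- ===== LEMMAS AND PROOFS =====

-- 'Set.update s xs' only appends to s
theorem pv_update_prefix (xs : List Int) (s : PySem.Set Int) :
    ∃ t, PySem.Set.update s xs = s ++ t := by
  induction xs generalizing s with
  | nil => exact ⟨[], by simp [PySem.Set.update]⟩
  | cons x xs ih =>
    rcases ih (PySem.Set.add s x) with ⟨t, ht⟩
    by_cases h : x ∈ s
    · exact ⟨t, by simpa [PySem.Set.update, PySem.Set.add, h] using ht⟩
    · exact ⟨x :: t, by simpa [PySem.Set.update, PySem.Set.add, h] using ht⟩

-- A's inner loop over a flat item list, characterised: the seen-set becomes 'Set.update s xs'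
-- and the counter is bumped exactly once for each element newly appended to the seen-set.
theorem pv_inner (xs : List Int) (s : PySem.Set Int) (d : PySem.Dict Int Int) :
    xs.foldl pvStepA (s, d) =
      (PySem.Set.update s xs,
       ((PySem.Set.update s xs).drop s.length).foldl (fun d x => d.modify x 0 (· + 1)) d) := by
  induction xs generalizing s d with
  | nil => simp [PySem.Set.update]
  | cons x xs ih =>
    by_cases h : x ∈ s
    · have hstep : pvStepA (s, d) x = (s, d) := by simp [pvStepA, h]
      have hupd : PySem.Set.update s (x :: xs) = PySem.Set.update s xs := by
        simp [PySem.Set.update, PySem.Set.add, h]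
      rw [List.foldl_cons, hstep, hupd]
      exact ih s d
    · have hadd : PySem.Set.add s x = s ++ [x] := by simp [PySem.Set.add, h]
      have hstep : pvStepA (s, d) x = (s ++ [x], d.modify x 0 (· + 1)) := by
        simp [pvStepA, h, PySem.Set.add]
      rcases pv_update_prefix xs (PySem.Set.add s x) with ⟨t, ht⟩
      rw [hadd] at ht
      have hupd : PySem.Set.update s (x :: xs) = s ++ [x] ++ t := by
        simpa [PySem.Set.update, hadd] using ht
      have hdrop1 : (s ++ [x] ++ t).drop s.length = x :: t := by
        rw [List.append_assoc, List.drop_left]; rfl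
      have hdrop2 : (s ++ [x] ++ t).drop (s ++ [x]).length = t := by
        rw [List.drop_left]
      calc (x :: xs).foldl pvStepA (s, d)
          = xs.foldl pvStepA (s ++ [x], d.modify x 0 (· + 1)) := by rw [List.foldl_cons, hstep]
        _ = _ := by
            rw [ih (s ++ [x]) (d.modify x 0 (· + 1)),
              show PySem.Set.update (s ++ [x]) xs = s ++ [x] ++ t from by
                simpa [PySem.Set.update, hadd] using ht,
              hupd, hdrop1, hdrop2]
            simp

-- one transaction of A: the basket/item double loop bumps the counter once per distinct item
theorem pv_transaction (baskets : List (List Int)) (d : PySem.Dict Int Int) :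
    (baskets.foldl (fun st basket => basket.foldl pvStepA st) (PySem.Set.empty, d)).2 =
      (PySem.List.dedup baskets.flatten).foldl (fun d x => d.modify x 0 (· + 1)) d := by
  have hflat : baskets.foldl (fun st basket => basket.foldl pvStepA st) (PySem.Set.empty, d)
      = baskets.flatten.foldl pvStepA (PySem.Set.empty, d) := by
    rw [List.foldl_flatten]
  rw [hflat, pv_inner]
  simp only [PySem.List.dedup_eq_ofList, PySem.Set.ofList_eq_foldl]
  simp [PySem.Set.update, PySem.Set.empty]


-- abbreviation for A's per-transaction dict update
def pvStepT (d : PySem.Dict Int Int) (baskets : List (List Int)) : PySem.Dict Int Int :=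
  (PySem.List.dedup baskets.flatten).foldl (fun d x => d.modify x 0 (· + 1)) d

-- updating with a deduplicated list is updating with the list itself
theorem pv_update_dedup (s : PySem.Set Int) (l : List Int) :
    PySem.Set.update s (PySem.List.dedup l) = PySem.Set.update s l := by
  rw [PySem.Set.update_eq_append_filter, PySem.Set.update_eq_append_filter]
  simp [PySem.List.dedup_eq_ofList, PySem.Set.ofList_ofList]

-- keys of A's dict after all transactions: first occurrences of the flattened traversal
theorem pv_keys (ts : List (List (List Int))) (d : PySem.Dict Int Int) :
    (ts.foldl pvStepT d).keys = PySem.Set.update d.keys (ts.flatMap (fun bs => bs.flatten)) := by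
  induction ts generalizing d with
  | nil => simp [PySem.Set.update]
  | cons bs ts ih =>
    rw [List.foldl_cons, ih, List.flatMap_cons, PySem.Set.update_append]
    congr 1
    rw [show pvStepT d bs = (PySem.List.dedup bs.flatten).foldl (fun d x => d.modify x 0 (· + 1)) d from rfl,
      PySem.Dict.keys_foldl_modify, pv_update_dedup]

-- keys stay unique through the whole fold
theorem pv_nodup (ts : List (List (List Int))) (d : PySem.Dict Int Int) (h : d.keys.Nodup) :
    (ts.foldl pvStepT d).keys.Nodup := by
  induction ts generalizing d with
  | nil => exact h
  | cons bs ts ih =>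
    refine ih _ ?_
    rw [show pvStepT d bs = (PySem.List.dedup bs.flatten).foldl (fun d x => d.modify x 0 (· + 1)) d from rfl,
      PySem.Dict.keys_foldl_modify]
    exact PySem.Set.nodup_update _ _ h

-- a deduplicated list counts each member exactly once
theorem pv_count_dedup (l : List Int) (k : Int) :
    (PySem.List.dedup l).count k = if k ∈ l then 1 else 0 := by
  by_cases h : k ∈ l
  · rw [if_pos h]
    exact List.count_eq_one_of_mem (PySem.List.nodup_dedup l) ((PySem.List.mem_dedup l k).2 h)
  · simp [h, List.count_eq_zero]

-- the final count of k is the number of transactions whose flattening contains k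
theorem pv_getD (ts : List (List (List Int))) (d : PySem.Dict Int Int) (k : Int) :
    (ts.foldl pvStepT d).getD k 0 =
      d.getD k 0 + (ts.countP (fun bs => bs.flatten.contains k) : Int) := by
  induction ts generalizing d with
  | nil => simp
  | cons bs ts ih =>
    rw [List.foldl_cons, ih,
      show pvStepT d bs = (PySem.List.dedup bs.flatten).foldl (fun d x => d.modify x 0 (· + 1)) d from rfl,
      PySem.Dict.getD_foldl_modify_add_one, pv_count_dedup, List.countP_cons]
    by_cases h : k ∈ bs.flatten
    · simp [h]; ring
    · simp [h]

-- membership in B's per-transaction index is membership in the flattening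
theorem pv_contains_ofList (l : List Int) (k : Int) :
    PySem.Set.contains (PySem.Set.ofList l) k = l.contains k := by
  rw [Bool.eq_iff_iff]
  simp [PySem.Set.contains_iff, PySem.Set.mem_ofList, List.contains_eq_mem]

-- A's whole loop over transactions, with the per-transaction characterisation applied
theorem pv_foldA (ts : List (List (List Int))) (d : PySem.Dict Int Int) :
    ts.foldl
      (fun counts baskets =>
        (baskets.foldl (fun st basket => basket.foldl pvStepA st) (PySem.Set.empty, counts)).2)
      d = ts.foldl pvStepT d := by
  induction ts generalizing d with
  | nil => rfl
  | cons bs ts ih =>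
    rw [List.foldl_cons, List.foldl_cons, pv_transaction]
    exact ih _

-- ===== VERDICT (by name: the statement is the Claim_ definition above) =====
theorem build_standard_code_table_spec : Claim_equal_build_standard_code_table := by
  intro ts hd
  clear hd
  unfold Spec_build_standard_code_table build_standard_code_table build_standard_code_table_alt
  rw [pv_foldA]
  have hnd : (ts.foldl pvStepT PySem.Dict.empty).keys.Nodup := pv_nodup ts _ (by simp)
  rw [PySem.Dict.items_eq_map_keys _ hnd 0, pv_keys,
    show (PySem.Dict.empty : PySem.Dict Int Int).keys = ([] : List Int) from rfl,
    PySem.Set.update_nil_left]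
  simp only [PySem.List.dedup_eq_ofList]
  apply List.map_congr_left
  intro k hk
  have hc : List.countP (fun bs => bs.flatten.contains k) ts
      = List.countP (fun s => PySem.Set.contains s k) (ts.map (fun bs => PySem.Set.ofList bs.flatten)) := by
    rw [List.countP_map]
    exact List.countP_congr (fun bs _ => by simp [Function.comp, pv_contains_ofList])
  rw [pv_getD, PySem.Dict.getD_empty, zero_add, hc]
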